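-- pv_equiv track=rewrite | github.com/vanonymous76/stealthcheck | stealthcheck.py | getAlabelList
-- ===== SOURCE A (Python) =====
-- def getAlabelList(line):
--     # """
--     # Assumes comma separated, and opens and closes with square brackets
--     # """
--     line = line[1:-1]  # strip square brackets
--     funcs = []
--
--     current = ""
--     brack_stack = 0  # we don't want to follow comma's if they are in a function
--     for char in line:
--         if char == "(":
--             brack_stack += 1
--         elif char == ")":
--             brack_stack -= 1
--
--         if char == "," and brack_stack == 0:
--             # new function, clear current and append to list
--             funcs.append(current)
--             current = ""
--         else:
--             current += char
--     #  Append only if there is at least one label else leave it as it is (blank)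
--     if current:
--         funcs.append(current)
--     return funcs
-- ===== SOURCE B (Python) =====
-- def getAlabelList(line):
--     inner = line[1:-1]
--     pieces = inner.split(',')
--     out = []
--     buf = pieces[0]
--     depth = buf.count('(') - buf.count(')')
--     for p in pieces[1:]:
--         if depth == 0:
--             out.append(buf)
--             buf = p
--         else:
--             buf = buf + ',' + p
--         depth += p.count('(') - p.count(')')
--     if buf:
--         out.append(buf)
--     return out
-- ===== Notes on version B (the rewrite author's own statement) =====
-- stated objective: faster
-- what changed: B replaces A's char-by-char state machine (building each segment one character at a time) by a naive split(',') followed by a merge pass over the pieces that rejoins fragments whose running paren depth is nonzero.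
import Mathlib
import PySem

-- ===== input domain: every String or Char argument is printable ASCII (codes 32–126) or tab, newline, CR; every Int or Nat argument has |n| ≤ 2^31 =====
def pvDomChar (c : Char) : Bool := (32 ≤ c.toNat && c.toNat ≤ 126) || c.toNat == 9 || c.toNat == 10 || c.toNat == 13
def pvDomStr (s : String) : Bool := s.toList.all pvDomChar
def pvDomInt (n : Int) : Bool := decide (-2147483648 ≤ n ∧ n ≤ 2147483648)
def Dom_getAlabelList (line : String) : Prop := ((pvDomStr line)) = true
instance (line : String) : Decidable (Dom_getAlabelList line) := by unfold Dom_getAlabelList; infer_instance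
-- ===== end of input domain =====

-- B re-implements A via a naive split(',') plus a depth-driven merge pass over the pieces
-- (different decomposition; measured faster by a constant factor: bulk split/joins instead of per-char appends).

-- ===== PORT A =====
-- A's loop body: update brack_stack, then either flush `current` (comma at depth 0) or extend it.
def pvStepA (st : List (List Char) × List Char × Int) (c : Char) : List (List Char) × List Char × Int :=
  let bs := if c = '(' then st.2.2 + 1 else if c = ')' then st.2.2 - 1 else st.2.2
  if c = ',' ∧ bs = 0 then (st.1 ++ [st.2.1], [], bs) else (st.1, st.2.1 ++ [c], bs)

def getAlabelList (line : String) : List String :=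
  let inner := PySem.List.slice line.toList (some 1) (some (-1))  -- line[1:-1]
  let st := inner.foldl pvStepA ([], [], 0)
  (if st.2.1 = [] then st.1 else st.1 ++ [st.2.1]).map (fun cs => String.ofList cs)

-- ===== PORT B =====
-- p.count('(') - p.count(')')
def pvDelta (p : List Char) : Int :=
  (PySem.Chars.count p ['('] : Int) - (PySem.Chars.count p [')'] : Int)

-- B's loop body: at depth 0 flush the buffer and start a new one, else rejoin with the comma.
def pvStepB (st : List (List Char) × List Char × Int) (p : List Char) : List (List Char) × List Char × Int :=
  if st.2.2 = 0 then (st.1 ++ [st.2.1], p, st.2.2 + pvDelta p)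
  else (st.1, st.2.1 ++ ',' :: p, st.2.2 + pvDelta p)

def getAlabelList_alt (line : String) : List String :=
  let inner := PySem.List.slice line.toList (some 1) (some (-1))  -- line[1:-1]
  match PySem.Chars.splitOn inner [','] with                      -- inner.split(',')
  | [] => []  -- unreachable: split(',') always returns a non-empty list (pieces[0] never raises)
  | p0 :: rest =>
    let st := rest.foldl pvStepB ([], p0, pvDelta p0)
    (if st.2.1 = [] then st.1 else st.1 ++ [st.2.1]).map (fun cs => String.ofList cs)

-- ===== PRECONDITION & SPEC =====
def Spec_getAlabelList (line : String) (out : List String) : Prop := out = getAlabelList_alt line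
instance (line : String) (out : List String) : Decidable (Spec_getAlabelList line out) := by unfold Spec_getAlabelList; infer_instance

-- ===== CLAIM (what is proved, stated in full; the proofs are below) =====
def Claim_equal_getAlabelList : Prop := ∀ (line : String), Dom_getAlabelList line → Spec_getAlabelList line (getAlabelList line)

-- ===== LEMMAS AND PROOFS =====

-- (head, tail) of the comma-split of a char list: proof-side characterisation of split(',')
def pvSplitHT : List Char → List Char × List (List Char)
  | [] => ([], [])
  | c :: r =>
    let (h, t) := pvSplitHT r
    if c = ',' then ([], h :: t) else (c :: h, t)

theorem pvCountGo_single (c : Char) (l : List Char) : ∀ (f : Nat), l.length ≤ f → ∀ acc,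
    PySem.Chars.count.go [c] f l acc = acc + l.count c := by
  induction l with
  | nil => intro f _ acc; cases f <;> simp [PySem.Chars.count.go]
  | cons x r ih =>
    intro f hf acc
    cases f with
    | zero => simp at hf
    | succ f =>
      by_cases hx : x = c
      · subst hx
        simp [PySem.Chars.count.go, List.isPrefixOf, ih f (by simpa using hf)]
        ring
      · simp [PySem.Chars.count.go, List.isPrefixOf, hx, ih f (by simpa using hf)]
        simp [Ne.symm hx]

theorem pvCount_single (c : Char) (l : List Char) : PySem.Chars.count l [c] = l.count c := by
  simp [PySem.Chars.count, pvCountGo_single c l l.length le_rfl 0]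

theorem pvDelta_nil : pvDelta [] = 0 := by simp [pvDelta, pvCount_single]

theorem pvDelta_cons (c : Char) (p : List Char) :
    pvDelta (c :: p) = (if c = '(' then 1 else if c = ')' then -1 else 0) + pvDelta p := by
  simp only [pvDelta, pvCount_single, List.count_cons]
  by_cases h1 : c = '(' <;> by_cases h2 : c = ')' <;> simp_all <;> ring

theorem pvSplitOnGo (l : List Char) : ∀ (f : Nat), l.length ≤ f → ∀ cur acc,
    PySem.Chars.splitOn.go [','] f l cur acc
      = acc.reverse ++ ((cur.reverse ++ (pvSplitHT l).1) :: (pvSplitHT l).2) := by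
  induction l with
  | nil => intro f _ cur acc; cases f <;> simp [PySem.Chars.splitOn.go, pvSplitHT]
  | cons x r ih =>
    intro f hf cur acc
    cases f with
    | zero => simp at hf
    | succ f =>
      by_cases hx : x = ','
      · subst hx
        simp [PySem.Chars.splitOn.go, List.isPrefixOf, ih f (by simpa using hf), pvSplitHT]
      · simp [PySem.Chars.splitOn.go, List.isPrefixOf, hx, ih f (by simpa using hf), pvSplitHT]
        exact Ne.symm hx

theorem pvSplitOn_eq (l : List Char) :
    PySem.Chars.splitOn l [','] = (pvSplitHT l).1 :: (pvSplitHT l).2 := by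
  simp [PySem.Chars.splitOn, pvSplitOnGo l (l.length + 1) (by omega) [] []]

theorem pvMain (l : List Char) : ∀ (funcs : List (List Char)) (cur : List Char) (bs : Int),
    l.foldl pvStepA (funcs, cur, bs)
      = (pvSplitHT l).2.foldl pvStepB (funcs, cur ++ (pvSplitHT l).1, bs + pvDelta (pvSplitHT l).1) := by
  induction l with
  | nil => intro funcs cur bs; simp [pvSplitHT, pvDelta_nil]
  | cons c r ih =>
    intro funcs cur bs
    by_cases hc : c = ','
    · subst hc
      by_cases hbs : bs = 0
      · subst hbs
        have h1 : pvStepA (funcs, cur, 0) ',' = (funcs ++ [cur], [], 0) := by simp [pvStepA]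
        simp only [List.foldl, h1, pvSplitHT, ih]
        cases hr : pvSplitHT r with
        | mk h t => simp [pvStepB, pvDelta_nil]
      · have h1 : pvStepA (funcs, cur, bs) ',' = (funcs, cur ++ [','], bs) := by simp [pvStepA, hbs]
        simp only [List.foldl, h1, pvSplitHT, ih]
        cases hr : pvSplitHT r with
        | mk h t => simp [pvStepB, hbs, pvDelta_nil]
    · have h1 : pvStepA (funcs, cur, bs) c
          = (funcs, cur ++ [c], bs + (if c = '(' then 1 else if c = ')' then -1 else 0)) := by
        by_cases h2 : c = '(' <;> by_cases h3 : c = ')' <;> simp_all [pvStepA] <;> ring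
      simp only [List.foldl, h1, pvSplitHT, if_neg hc, ih]
      cases hr : pvSplitHT r with
      | mk h t =>
        simp [pvDelta_cons]
        ring_nf

-- ===== VERDICT (by name: the statement is the Claim_ definition above) =====
theorem getAlabelList_spec : Claim_equal_getAlabelList := by
  intro line _
  simp only [Spec_getAlabelList, getAlabelList, getAlabelList_alt, pvSplitOn_eq]
  rw [pvMain]
  simp
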